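-- pv_equiv track=rewrite | github.com/SouravDas25/NetworkingPaper | python/main/graphs/SnakesAndLadders.py | buildBoard2
-- ===== SOURCE A (Python) =====
-- from typing import List, Dict, Tuple
--
-- def buildBoard2(inputBoard: List[List[int]]):
--     board = {}
--     count = 1
--     flag = True
--     for i in range(len(inputBoard) - 1, -1, -1):
--         if flag:
--             for j in range(len(inputBoard[i])):
--                 board[count] = count if inputBoard[i][j] == -1 else inputBoard[i][j]
--                 count += 1
--         else:
--             for j in range(len(inputBoard[i]) - 1, -1, -1):
--                 board[count] = count if inputBoard[i][j] == -1 else inputBoard[i][j]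
--                 count += 1
--         flag = not flag
--     return board
-- ===== SOURCE B (Python) =====
-- def buildBoard2(inputBoard):
--     rows = inputBoard[::-1]          # bottom row first
--     starts = [0]                     # starts[k] = number of cells strictly below row k
--     for r in rows:
--         starts.append(starts[-1] + len(r))
--     total = starts[-1]
--     board = {}
--     for c in range(1, total + 1):
--         i = c - 1
--         # binary search: largest k with starts[k] <= i  (that row contains cell i)
--         lo, hi = 0, len(rows) - 1
--         while lo < hi:
--             mid = (lo + hi + 1) // 2
--             if starts[mid] <= i:
--                 lo = mid
--             else:
--                 hi = mid - 1
--         row = rows[lo]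
--         j = i - starts[lo]
--         v = row[j] if lo % 2 == 0 else row[len(row) - 1 - j]
--         board[c] = c if v == -1 else v
--     return board
-- ===== Notes on version B (the rewrite author's own statement) =====
-- stated objective: alternative
-- what changed: B never traverses the grid serpentine-wise: it builds prefix sums of the bottom-up row lengths once, and for each board number 1..N binary-searches those sums to locate the cell's row (parity of the row index giving the reading direction) and reads the grid there, replacing A's flag-toggling nested-loop traversal with a running counter.
import Mathlib
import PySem

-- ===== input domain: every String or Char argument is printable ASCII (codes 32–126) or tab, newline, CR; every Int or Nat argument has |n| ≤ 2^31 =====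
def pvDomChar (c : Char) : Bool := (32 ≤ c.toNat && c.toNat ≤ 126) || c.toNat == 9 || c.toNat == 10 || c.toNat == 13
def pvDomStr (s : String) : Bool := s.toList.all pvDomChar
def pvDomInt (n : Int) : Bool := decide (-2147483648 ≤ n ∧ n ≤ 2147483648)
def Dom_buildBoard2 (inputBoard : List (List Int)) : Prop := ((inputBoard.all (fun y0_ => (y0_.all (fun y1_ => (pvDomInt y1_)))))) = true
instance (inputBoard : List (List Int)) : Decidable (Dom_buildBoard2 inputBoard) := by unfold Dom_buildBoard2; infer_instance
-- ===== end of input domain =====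

-- B computes each board number's value by positional lookup — prefix sums of the bottom-up
-- row lengths plus a binary search locate the cell's row, and the grid is read there —
-- instead of A's serpentine traversal with a direction flag and a counter (alternative algorithm).

-- ===== PORT A =====
-- inner loop body: board[count] = count if v == -1 else v; count += 1
def pvInner (p : PySem.Dict Int Int × Int) (v : Int) : PySem.Dict Int Int × Int :=
  (p.1.insert p.2 (if v == -1 then p.2 else v), p.2 + 1)

-- one outer-loop iteration: the 'if flag' branch walks the row left-to-right
-- (for j in range(len(row))), the other right-to-left (for j in range(len(row)-1,-1,-1));
-- both index loops run over the whole row, so they are the folds over row / row.reverse; flag flips.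
def pvOuter (st : PySem.Dict Int Int × Int × Bool) (row : List Int) :
    PySem.Dict Int Int × Int × Bool :=
  if st.2.2 then
    let p := row.foldl pvInner (st.1, st.2.1)
    (p.1, p.2, false)
  else
    let p := row.reverse.foldl pvInner (st.1, st.2.1)
    (p.1, p.2, true)

-- for i in range(len(inputBoard)-1,-1,-1) visits the rows in reverse order
def buildBoard2 (inputBoard : List (List Int)) : List (Int × Int) :=
  (inputBoard.reverse.foldl pvOuter (PySem.Dict.empty, 1, true)).1.items

-- ===== PORT B =====
-- starts = [0]; for r in rows: starts.append(starts[-1] + len(r))   (starts is never empty,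
-- so starts[-1] is exactly getLastD 0)
def pvStarts (rows : List (List Int)) : List Int :=
  rows.foldl (fun p r => p ++ [p.getLastD 0 + (r.length : Int)]) [0]

-- while lo < hi: mid = (lo + hi + 1) // 2; ...   lo, hi are nonnegative Python ints (Nat here);
-- (lo + hi + 1) // 2 on nonnegative ints is Nat division; starts[mid] with mid ≤ hi in range is getD
def pvSearch (starts : List Int) (i : Int) (lo hi : Nat) : Nat :=
  if h : lo < hi then
    let mid := (lo + hi + 1) / 2
    if starts.getD mid 0 ≤ i then pvSearch starts i mid hi
    else pvSearch starts i lo (mid - 1)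
  else lo
termination_by hi - lo
decreasing_by all_goals omega

def buildBoard2_alt (inputBoard : List (List Int)) : List (Int × Int) :=
  let rows := inputBoard.reverse                 -- inputBoard[::-1]
  let starts := pvStarts rows
  let total := starts.getLastD 0                 -- starts[-1]
  -- for c in range(1, total + 1): i = c - 1; binary search for the row; read the cell
  ((PySem.List.pyRange 1 (total + 1) 1).foldl
    (fun (d : PySem.Dict Int Int) (c : Int) =>
      let i := c - 1
      let lo := pvSearch starts i 0 (rows.length - 1)
      let row := rows.getD lo []                 -- rows[lo]; lo ≤ len(rows) - 1 is in range
      let j := i - starts.getD lo 0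
      let v := if lo % 2 = 0 then PySem.List.pyGetD row j 0
               else PySem.List.pyGetD row ((row.length : Int) - 1 - j) 0
      d.insert c (if v == -1 then c else v))
    PySem.Dict.empty).items

-- ===== PRECONDITION & SPEC =====
def Spec_buildBoard2 (inputBoard : List (List Int)) (out : List (Int × Int)) : Prop := out = buildBoard2_alt inputBoard
instance (inputBoard : List (List Int)) (out : List (Int × Int)) : Decidable (Spec_buildBoard2 inputBoard out) := by unfold Spec_buildBoard2; infer_instance

-- ===== CLAIM (what is proved, stated in full; the proofs are below) =====
def Claim_equal_buildBoard2 : Prop := ∀ (inputBoard : List (List Int)), Dom_buildBoard2 inputBoard → Spec_buildBoard2 inputBoard (buildBoard2 inputBoard)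

-- ===== LEMMAS AND PROOFS =====

-- the serpentine flattening, as a structural recursion with the direction flag
def pvSerp : List (List Int) → Bool → List Int
  | [], _ => []
  | r :: rs, flag => (if flag then r else r.reverse) ++ pvSerp rs (!flag)

def pvF (cv : Int × Int) : Int × Int := (cv.1, if cv.2 == -1 then cv.1 else cv.2)

lemma pvInner_spec (row : List Int) (d : PySem.Dict Int Int) (c : Int)
    (hk : ∀ k ∈ d.keys, k < c) :
    row.foldl pvInner (d, c) =
      (PySem.Dict.mk (d.items ++ (PySem.List.enumerate row c).map pvF), c + row.length) := by
  induction row generalizing d c with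
  | nil => simp [PySem.List.enumerate]
  | cons v row ih =>
    have hc : d.contains c = false := by
      rw [PySem.Dict.contains_eq_decide_mem_keys]
      simp only [decide_eq_false_iff_not]
      intro hmem
      exact absurd (hk c hmem) (lt_irrefl c)
    have hins : d.insert c (if v == -1 then c else v) =
        PySem.Dict.mk (d.items ++ [(c, if v == -1 then c else v)]) := by
      apply PySem.Dict.ext
      simp [PySem.Dict.items_insert, hc]
    have hk' : ∀ k ∈ (PySem.Dict.mk (d.items ++ [(c, if v == -1 then c else v)])).keys, k < c + 1 := by
      intro k hkmem
      simp only [PySem.Dict.keys_mk, List.map_append, List.mem_append, List.map_cons,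
        List.map_nil, List.mem_cons, List.not_mem_nil, or_false] at hkmem
      rcases hkmem with h1 | h2
      · have := hk k (by simpa [PySem.Dict.keys] using h1); omega
      · omega
    show List.foldl pvInner (pvInner (d, c) v) row = _
    rw [show pvInner (d, c) v = (d.insert c (if v == -1 then c else v), c + 1) from rfl, hins,
      ih _ _ hk']
    simp [PySem.List.enumerate_cons, pvF, Prod.ext_iff]
    omega

lemma pvOuter_spec (rows : List (List Int)) (d : PySem.Dict Int Int) (c : Int) (flag : Bool)
    (hk : ∀ k ∈ d.keys, k < c) :
    (rows.foldl pvOuter (d, c, flag)).1 =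
      PySem.Dict.mk (d.items ++ (PySem.List.enumerate (pvSerp rows flag) c).map pvF) ∧
    (rows.foldl pvOuter (d, c, flag)).2.1 = c + (pvSerp rows flag).length := by
  induction rows generalizing d c flag with
  | nil => simp [pvSerp]
  | cons r rs ih =>
    set r' : List Int := if flag then r else r.reverse with hr'
    have hstep : List.foldl pvOuter (d, c, flag) (r :: rs) =
        List.foldl pvOuter
          (PySem.Dict.mk (d.items ++ (PySem.List.enumerate r' c).map pvF),
            c + r'.length, !flag) rs := by
      show List.foldl pvOuter (pvOuter (d, c, flag) r) rs = _
      cases flag <;>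
        simp [pvOuter, hr', pvInner_spec _ _ _ hk]
    have hk' : ∀ k ∈ (PySem.Dict.mk (d.items ++ (PySem.List.enumerate r' c).map pvF)).keys,
        k < c + r'.length := by
      intro k hkmem
      simp only [PySem.Dict.keys_mk, List.map_append, List.mem_append, List.map_map] at hkmem
      rcases hkmem with h1 | h2
      · have := hk k (by simpa [PySem.Dict.keys] using h1)
        have : (0 : Int) ≤ r'.length := by positivity
        omega
      · simp only [List.mem_map] at h2
        obtain ⟨p, hp, hpk⟩ := h2
        rw [PySem.List.mem_enumerate_iff] at hp
        obtain ⟨j, hj, rfl⟩ := hp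
        simp only [Function.comp, pvF] at hpk
        omega
    obtain ⟨h1, h2⟩ := ih (PySem.Dict.mk (d.items ++ (PySem.List.enumerate r' c).map pvF))
      (c + r'.length) (!flag) hk'
    rw [hstep, h1, h2]
    have hserp : pvSerp (r :: rs) flag = r' ++ pvSerp rs (!flag) := by
      cases flag <;> simp [pvSerp, hr']
    rw [hserp, PySem.List.enumerate_append]
    constructor
    · simp [List.map_append, List.append_assoc]
    · simp
      omega

lemma pvSerp_length (rows : List (List Int)) (flag : Bool) :
    (pvSerp rows flag).length = (rows.map List.length).sum := by
  induction rows generalizing flag with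
  | nil => simp [pvSerp]
  | cons r rs ih => cases flag <;> simp [pvSerp, ih]

-- cells strictly below row r (bottom-up): prefix sum of the first r row lengths
def pvSumTake (rows : List (List Int)) (r : Nat) : Nat :=
  ((rows.take r).map List.length).sum

-- the tail of the starts list, as a structural recursion carrying the running sum
def pvPS : List (List Int) → Nat → List Int
  | [], _ => []
  | r :: rs, s => (((s + r.length : Nat)) : Int) :: pvPS rs (s + r.length)

lemma pvStarts_go (rows : List (List Int)) :
    ∀ (p : List Int) (s : Nat), p.getLastD 0 = ((s : Nat) : Int) →
      rows.foldl (fun p r => p ++ [p.getLastD 0 + (r.length : Int)]) p = p ++ pvPS rows s := by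
  induction rows with
  | nil => intro p s _; simp [pvPS]
  | cons r rs ih =>
    intro p s hp
    have hx : p.getLastD 0 + (r.length : Int) = (((s + r.length : Nat)) : Int) := by
      rw [hp]; push_cast; ring
    have h1 : (p ++ [p.getLastD 0 + (r.length : Int)]).getLastD 0
        = (((s + r.length : Nat)) : Int) := by
      rw [List.getLastD_concat, hx]
    calc List.foldl _ p (r :: rs)
        = List.foldl (fun p r => p ++ [p.getLastD 0 + (r.length : Int)])
            (p ++ [p.getLastD 0 + (r.length : Int)]) rs := rfl
      _ = (p ++ [p.getLastD 0 + (r.length : Int)]) ++ pvPS rs (s + r.length) := ih _ _ h1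
      _ = p ++ pvPS (r :: rs) s := by rw [hx]; simp [pvPS]

lemma pvStarts_eq (rows : List (List Int)) : pvStarts rows = 0 :: pvPS rows 0 := by
  unfold pvStarts
  rw [pvStarts_go rows [0] 0 (by simp)]
  simp

lemma pvPS_getD (rows : List (List Int)) :
    ∀ (s t : Nat), t < rows.length →
      (pvPS rows s).getD t 0 = (((s + pvSumTake rows (t + 1) : Nat)) : Int) := by
  induction rows with
  | nil => intro s t h; simp at h
  | cons r rs ih =>
    intro s t h
    cases t with
    | zero => simp [pvPS, pvSumTake]
    | succ t =>
      have := ih (s + r.length) t (by simpa using h)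
      simp only [pvPS, List.getD_cons_succ, this, pvSumTake, List.take_succ_cons,
        List.map_cons, List.sum_cons]
      congr 1
      omega

lemma pvStarts_getD (rows : List (List Int)) (t : Nat) (h : t ≤ rows.length) :
    (pvStarts rows).getD t 0 = ((pvSumTake rows t : Nat) : Int) := by
  rw [pvStarts_eq]
  cases t with
  | zero => simp [pvSumTake]
  | succ t =>
    simp only [List.getD_cons_succ]
    rw [pvPS_getD rows 0 t (by omega)]
    simp

lemma pvPS_getLastD (rows : List (List Int)) :
    ∀ (s : Nat), (pvPS rows s).getLastD ((s : Nat) : Int)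
      = (((s + pvSumTake rows rows.length : Nat)) : Int) := by
  induction rows with
  | nil => intro s; simp [pvPS, pvSumTake]
  | cons r rs ih =>
    intro s
    simp only [pvPS, List.getLastD_cons, ih (s + r.length), pvSumTake]
    congr 1
    simp
    omega

lemma pvStarts_getLastD (rows : List (List Int)) :
    (pvStarts rows).getLastD 0 = ((pvSumTake rows rows.length : Nat) : Int) := by
  rw [pvStarts_eq, List.getLastD_cons]
  simpa using pvPS_getLastD rows 0

lemma pvSumTake_mono (rows : List (List Int)) (a b : Nat) (h : a ≤ b) :
    pvSumTake rows a ≤ pvSumTake rows b := by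
  unfold pvSumTake
  rw [show b = a + (b - a) by omega, List.take_add, List.map_append, List.sum_append]
  omega

-- the binary search returns the largest r in [lo, hi] with starts[r] ≤ i,
-- provided starts[lo] ≤ i (indices read through pvSumTake)
lemma pvSearch_spec (rows : List (List Int)) (i : Int) :
    ∀ (n lo hi : Nat), hi - lo = n → lo ≤ hi → hi ≤ rows.length →
      ((pvSumTake rows lo : Nat) : Int) ≤ i →
      lo ≤ pvSearch (pvStarts rows) i lo hi ∧
      pvSearch (pvStarts rows) i lo hi ≤ hi ∧
      ((pvSumTake rows (pvSearch (pvStarts rows) i lo hi) : Nat) : Int) ≤ i ∧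
      ∀ s, pvSearch (pvStarts rows) i lo hi < s → s ≤ hi →
        i < ((pvSumTake rows s : Nat) : Int) := by
  intro n
  induction n using Nat.strong_induction_on with
  | _ n ihn =>
    intro lo hi hn hle hhi hlo
    by_cases h : lo < hi
    · have hmid1 : lo < (lo + hi + 1) / 2 := by omega
      have hmid2 : (lo + hi + 1) / 2 ≤ hi := by omega
      have hgd : (pvStarts rows).getD ((lo + hi + 1) / 2) 0
          = ((pvSumTake rows ((lo + hi + 1) / 2) : Nat) : Int) :=
        pvStarts_getD rows _ (by omega)
      rw [show pvSearch (pvStarts rows) i lo hi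
          = (if (pvStarts rows).getD ((lo + hi + 1) / 2) 0 ≤ i
              then pvSearch (pvStarts rows) i ((lo + hi + 1) / 2) hi
              else pvSearch (pvStarts rows) i lo ((lo + hi + 1) / 2 - 1)) from by
        rw [pvSearch]; simp [h]]
      by_cases hc : (pvStarts rows).getD ((lo + hi + 1) / 2) 0 ≤ i
      · rw [if_pos hc]
        have := ihn (hi - (lo + hi + 1) / 2) (by omega) ((lo + hi + 1) / 2) hi rfl
          (by omega) hhi (by rw [← hgd]; exact hc)
        exact ⟨by omega, this.2.1, this.2.2.1, this.2.2.2⟩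
      · rw [if_neg hc]
        have := ihn ((lo + hi + 1) / 2 - 1 - lo) (by omega) lo ((lo + hi + 1) / 2 - 1) rfl
          (by omega) (by omega) hlo
        refine ⟨this.1, by omega, this.2.2.1, ?_⟩
        intro s hs1 hs2
        by_cases hs3 : s ≤ (lo + hi + 1) / 2 - 1
        · exact this.2.2.2 s hs1 hs3
        · have hmono : pvSumTake rows ((lo + hi + 1) / 2) ≤ pvSumTake rows s :=
            pvSumTake_mono rows _ _ (by omega)
          rw [hgd] at hc
          omega
    · rw [show pvSearch (pvStarts rows) i lo hi = lo from by rw [pvSearch]; simp [h]]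
      exact ⟨le_refl _, hle, by rwa [show lo = hi by omega] at hlo ⊢,
        fun s hs1 hs2 => absurd (by omega : lo < hi) h⟩

-- the serpentine flattening read at a position inside row r (bottom-up), direction by parity
lemma pvSerp_getD (rows : List (List Int)) :
    ∀ (k r i : Nat), r < rows.length → pvSumTake rows r ≤ i → i < pvSumTake rows (r + 1) →
      (pvSerp rows (k % 2 = 0)).getD i 0 =
        (if (k + r) % 2 = 0 then (rows.getD r []).getD (i - pvSumTake rows r) 0
         else (rows.getD r []).getD ((rows.getD r []).length - 1 - (i - pvSumTake rows r)) 0) := by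
  induction rows with
  | nil => intro k r i h; simp at h
  | cons row rs ih =>
    intro k r i hr h1 h2
    have hserp : pvSerp (row :: rs) (decide (k % 2 = 0)) =
        (if decide (k % 2 = 0) = true then row else row.reverse) ++
          pvSerp rs (!decide (k % 2 = 0)) := rfl
    have hlen' : (if decide (k % 2 = 0) = true then row else row.reverse).length
        = row.length := by split <;> simp
    cases r with
    | zero =>
      have hi : i < row.length := by
        simpa [pvSumTake] using h2
      rw [hserp, List.getD_append _ _ _ _ (by omega)]
      simp only [pvSumTake, List.take_zero, List.map_nil, List.sum_nil, Nat.sub_zero,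
        List.getD_cons_zero, Nat.add_zero]
      by_cases hk : k % 2 = 0
      · simp [hk]
      · have hlenr : i < row.reverse.length := by simpa using hi
        simp only [hk, decide_false, Bool.false_eq_true, if_false]
        rw [List.getD_eq_getElem _ _ hlenr, List.getElem_reverse,
          List.getD_eq_getElem _ _ (by omega : row.length - 1 - i < row.length)]
    | succ r =>
      have hlow : row.length + pvSumTake rs r ≤ i := by
        simpa [pvSumTake] using h1
      have hhigh : i < row.length + pvSumTake rs (r + 1) := by
        simpa [pvSumTake] using h2
      rw [hserp, List.getD_append_right _ _ _ _ (by omega), hlen']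
      rw [show (!decide (k % 2 = 0)) = decide ((k + 1) % 2 = 0) from by
        rcases Nat.mod_two_eq_zero_or_one k with hk | hk <;> simp [hk] <;> omega]
      rw [ih (k + 1) r (i - row.length) (by simpa using hr) (by omega) (by omega)]
      have e1 : (k + 1 + r) % 2 = (k + (r + 1)) % 2 := by omega
      have e2 : i - row.length - (List.map List.length (List.take r rs)).sum
          = i - (List.map List.length (List.take (r + 1) (row :: rs))).sum := by
        simp only [List.take_succ_cons, List.map_cons, List.sum_cons]
        omega
      simp only [List.getD_cons_succ, e1, pvSumTake] at *
      rw [e2]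

-- the dict loop inserts fresh strictly increasing keys 1, 2, …: items is the map
lemma pvDictRange_items (w : Int → Int) (n : Nat) :
    ((PySem.List.pyRange 1 ((n : Int) + 1) 1).foldl
      (fun (d : PySem.Dict Int Int) c => d.insert c (w c)) PySem.Dict.empty).items
    = (PySem.List.pyRange 1 ((n : Int) + 1) 1).map (fun c => (c, w c)) := by
  induction n with
  | zero =>
    rw [PySem.List.pyRange_one_eq_nil (by norm_num)]
    rfl
  | succ m ih =>
    have hcast : (((m + 1 : Nat)) : Int) + 1 = (((m : Nat) : Int) + 1) + 1 := by push_cast; ring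
    rw [hcast, PySem.List.pyRange_one_succ_right (by omega)]
    rw [List.foldl_append, List.map_append]
    set d := (PySem.List.pyRange 1 ((m : Nat) + 1) 1).foldl
      (fun (d : PySem.Dict Int Int) c => d.insert c (w c)) PySem.Dict.empty with hd
    have hc : d.contains ((m : Int) + 1) = false := by
      rw [PySem.Dict.contains_eq_decide_mem_keys]
      simp only [decide_eq_false_iff_not, PySem.Dict.keys, ih]
      simp only [List.map_map, List.mem_map, Function.comp]
      rintro ⟨c, hcmem, hkey⟩
      rw [PySem.List.mem_pyRange_one] at hcmem
      omega
    simp only [List.foldl_cons, List.foldl_nil]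
    rw [show (d.insert ((m : Int) + 1) (w ((m : Int) + 1))).items
        = d.items ++ [((m : Int) + 1, w ((m : Int) + 1))] from by
      simp [PySem.Dict.items_insert, hc]]
    rw [ih]
    rfl

-- the value B inserts for key c (the port's lambda body, named for the proof)
def pvV (rows : List (List Int)) (c : Int) : Int :=
  let i := c - 1
  let lo := pvSearch (pvStarts rows) i 0 (rows.length - 1)
  let row := rows.getD lo []
  let j := i - (pvStarts rows).getD lo 0
  let v := if lo % 2 = 0 then PySem.List.pyGetD row j 0
           else PySem.List.pyGetD row ((row.length : Int) - 1 - j) 0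
  if v == -1 then c else v

-- ===== VERDICT (by name: the statement is the Claim_ definition above) =====
theorem buildBoard2_spec : Claim_equal_buildBoard2 := by
  intro inputBoard _
  show buildBoard2 inputBoard = buildBoard2_alt inputBoard
  unfold buildBoard2
  have hA := (pvOuter_spec inputBoard.reverse PySem.Dict.empty 1 true
    (by intro k hk; simp [PySem.Dict.keys, PySem.Dict.empty] at hk)).1
  rw [hA]
  set rows := inputBoard.reverse with hrows
  set flat := pvSerp rows true with hflat
  set N := pvSumTake rows rows.length with hN
  have hlen : flat.length = N := by
    rw [hflat, hN, pvSerp_length]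
    simp [pvSumTake]
  have hB : buildBoard2_alt inputBoard =
      ((PySem.List.pyRange 1 ((pvStarts rows).getLastD 0 + 1) 1).foldl
        (fun (d : PySem.Dict Int Int) c => d.insert c (pvV rows c)) PySem.Dict.empty).items := rfl
  rw [hB, pvStarts_getLastD rows, ← hN, pvDictRange_items (pvV rows) N]
  simp only [show (PySem.Dict.empty : PySem.Dict Int Int).items = [] from rfl, List.nil_append]
  apply List.ext_getElem
  · simp [PySem.List.length_enumerate, PySem.List.length_pyRange_one, hlen]
  · intro k h1 h2
    have hk : k < N := by simpa [PySem.List.length_enumerate, hlen] using h1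
    have hkflat : k < flat.length := by omega
    simp only [List.getElem_map, PySem.List.getElem_enumerate,
      PySem.List.getElem_pyRange_one]
    -- the binary search finds the row containing cell k
    have hrne : 0 < rows.length := by
      rcases rows with _ | ⟨r, rs⟩
      · exfalso; simp [pvSumTake] at hN; omega
      · simp
    have hsearch := pvSearch_spec rows ((1 : Int) + (k : Int) - 1)
      (rows.length - 1 - 0) 0 (rows.length - 1) rfl (by omega) (by omega)
      (by simp [pvSumTake])
    set lo := pvSearch (pvStarts rows) ((1 : Int) + (k : Int) - 1) 0 (rows.length - 1) with hlo
    obtain ⟨-, hlo2, hlo3, hlo4⟩ := hsearch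
    have hklo : pvSumTake rows lo ≤ k := by omega
    have hkhi : k < pvSumTake rows (lo + 1) := by
      by_cases hcase : lo < rows.length - 1
      · have := hlo4 (lo + 1) (by omega) (by omega)
        omega
      · have hloeq : lo + 1 = rows.length := by omega
        rw [hloeq]
        omega
    have hrowlen : k - pvSumTake rows lo < (rows.getD lo []).length := by
      have hstep : pvSumTake rows (lo + 1) = pvSumTake rows lo + (rows.getD lo []).length := by
        unfold pvSumTake
        rw [List.take_add_one, List.map_append, List.sum_append]
        have hget : rows[lo]? = some (rows.getD lo []) := by
          rw [List.getElem?_eq_getElem (by omega), List.getD_eq_getElem _ _ (by omega)]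
        rw [hget]
        simp
      omega
    -- read the serpentine flattening at k through the located row
    have hser := pvSerp_getD rows 0 lo k (by omega) hklo hkhi
    rw [show (decide (0 % 2 = 0)) = true from by decide, ← hflat] at hser
    -- evaluate pvV at key 1 + k
    have hj : (1 : Int) + (k : Int) - 1 - ((pvSumTake rows lo : Nat) : Int)
        = (((k - pvSumTake rows lo : Nat)) : Int) := by
      push_cast [Nat.cast_sub hklo]
      ring
    have hv2 : (((rows.getD lo []).length : Nat) : Int) - 1 - (((k - pvSumTake rows lo : Nat)) : Int)
        = (((rows.getD lo []).length - 1 - (k - pvSumTake rows lo) : Nat) : Int) := by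
      omega
    have hV : pvV rows (1 + (k : Int)) =
        (if (if lo % 2 = 0 then (rows.getD lo []).getD (k - pvSumTake rows lo) 0
              else (rows.getD lo []).getD
                ((rows.getD lo []).length - 1 - (k - pvSumTake rows lo)) 0) == -1
          then 1 + (k : Int)
          else (if lo % 2 = 0 then (rows.getD lo []).getD (k - pvSumTake rows lo) 0
                else (rows.getD lo []).getD
                  ((rows.getD lo []).length - 1 - (k - pvSumTake rows lo)) 0)) := by
      simp only [pvV]
      rw [← hlo, pvStarts_getD rows lo (by omega), hj, hv2]
      simp [PySem.List.pyGetD_natCast]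
    rw [hV]
    -- both sides mention the same located cell value
    have hflatk : flat[k] = (if lo % 2 = 0
        then (rows.getD lo []).getD (k - pvSumTake rows lo) 0
        else (rows.getD lo []).getD
          ((rows.getD lo []).length - 1 - (k - pvSumTake rows lo)) 0) := by
      rw [← List.getD_eq_getElem flat 0 hkflat, hser]
      rcases Nat.mod_two_eq_zero_or_one lo with hp | hp <;>
        simp [hp]
    rw [hflatk]
    simp [pvF]
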